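-- pv_equiv track=rewrite | github.com/najjdata/Text-Analysis-Lesk-Algorithm- | hw2-ontological-lesk.py | wordOfInterest
-- ===== SOURCE A (Python) =====
-- def wordOfInterest(pos):
--     wn_pos=['NN','VB','JJ','JJR','JJS','NNP','VBG','RB','VBD','VBP']
--
--     woi1=[]
--
--     for x in pos:
--         arr=[]
--         for y in x:
--             if y[1] in wn_pos:
--                 arr.append(y)
--         woi1.append(arr)
--     woi=[]
--
--
--     for i in woi1:
--         arr2=[]
--         for j in i:
--
--             if j[1]=='VBD' or j[1]=='VB' or j[1]=='VBP':
--                 tup=(j[0],'v')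
--                 arr2.append(tup)
--             elif j[1]=='VBG':
--                 tup=(j[0],'n')
--                 arr2.append(tup)
--             elif j[1]=='NN' or j[1]=='NNP':
--                 tup=(j[0],'n')
--                 arr2.append(tup)
--             elif j[1]== 'JJ' or j[1]=='JJR' or j[1]=='JJS':
--                 tup=(j[0],'a')
--                 arr2.append(tup)
--             elif j[1]=='RB':
--                 tup=(j[0],'r')
--                 arr2.append(tup)
--         woi.append(arr2)
--
--     return woi
-- ===== SOURCE B (Python) =====
-- # One fused pass; classification done by the tag's FIRST LETTER (N->n, V->v,
-- # J->a, R->r) with the single exception VBG->n, instead of comparing against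
-- # each full tag; validity is one membership test in the 10-tag set.
-- _VALID = frozenset(['NN', 'VB', 'JJ', 'JJR', 'JJS', 'NNP', 'VBG', 'RB', 'VBD', 'VBP'])
-- _FIRST = {'N': 'n', 'V': 'v', 'J': 'a', 'R': 'r'}
--
--
-- def wordOfInterest(pos):
--     out = []
--     for x in pos:
--         row = []
--         for w, t in x:
--             if t in _VALID:
--                 row.append((w, 'n' if t == 'VBG' else _FIRST[t[0]]))
--         out.append(row)
--     return out
-- ===== Notes on version B (the rewrite author's own statement) =====
-- stated objective: alternative
-- what changed: A filters into an intermediate list and then classifies with a 10-way if/elif tag comparison in a second pass; B makes one fused pass and decides the WordNet letter from the tag's FIRST character (N->n, V->v, J->a, R->r) with the single exception VBG->n, after one membership test in the 10-tag set.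
import Mathlib
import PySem

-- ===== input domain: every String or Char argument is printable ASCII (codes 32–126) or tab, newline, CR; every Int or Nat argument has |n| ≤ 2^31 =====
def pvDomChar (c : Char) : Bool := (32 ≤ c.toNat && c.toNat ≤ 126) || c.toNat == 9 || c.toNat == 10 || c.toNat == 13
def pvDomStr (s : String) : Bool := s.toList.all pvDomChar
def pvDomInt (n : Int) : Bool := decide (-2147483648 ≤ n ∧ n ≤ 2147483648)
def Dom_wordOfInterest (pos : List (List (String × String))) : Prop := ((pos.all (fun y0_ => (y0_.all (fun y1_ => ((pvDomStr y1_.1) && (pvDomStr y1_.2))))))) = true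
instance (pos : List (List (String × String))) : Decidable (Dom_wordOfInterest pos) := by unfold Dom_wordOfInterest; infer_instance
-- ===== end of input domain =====

-- B fuses A's two passes into one and derives the WordNet letter from the tag's
-- first character (one VBG exception) instead of a 10-way tag comparison; objective: alternative.

-- ===== PORT A =====
def pvWnPos : List String := ["NN","VB","JJ","JJR","JJS","NNP","VBG","RB","VBD","VBP"]

def wordOfInterest (pos : List (List (String × String))) : List (List (String × String)) :=
  let woi1 := pos.foldl (fun woi1 x =>
    let arr := x.foldl (fun arr y =>
      if pvWnPos.contains y.2 then arr ++ [y] else arr) []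
    woi1 ++ [arr]) []
  woi1.foldl (fun woi i =>
    let arr2 := i.foldl (fun arr2 j =>
      if j.2 = "VBD" ∨ j.2 = "VB" ∨ j.2 = "VBP" then arr2 ++ [(j.1, "v")]
      else if j.2 = "VBG" then arr2 ++ [(j.1, "n")]
      else if j.2 = "NN" ∨ j.2 = "NNP" then arr2 ++ [(j.1, "n")]
      else if j.2 = "JJ" ∨ j.2 = "JJR" ∨ j.2 = "JJS" then arr2 ++ [(j.1, "a")]
      else if j.2 = "RB" then arr2 ++ [(j.1, "r")]
      else arr2) []
    woi ++ [arr2]) []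

-- ===== PORT B =====
def pvValid : PySem.Set String :=
  PySem.Set.ofList ["NN","VB","JJ","JJR","JJS","NNP","VBG","RB","VBD","VBP"]

def pvFirst : PySem.Dict String String :=
  PySem.Dict.ofList [("N","n"),("V","v"),("J","a"),("R","r")]

-- t[0] (a 1-char Python string) and _FIRST[t[0]] can raise only for tags outside
-- _VALID, which the guard excludes; the .getD defaults are unreachable there.
def wordOfInterest_alt (pos : List (List (String × String))) : List (List (String × String)) :=
  pos.foldl (fun out x =>
    let row := x.foldl (fun row y =>
      if PySem.Set.contains pvValid y.2 then
        row ++ [(y.1,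
          if y.2 = "VBG" then "n"
          else (PySem.Dict.get? pvFirst
                  (String.mk (((PySem.Str.pyGet? y.2 0).map (fun c => [c])).getD []))).getD "")]
      else row) []
    out ++ [row]) []

-- ===== PRECONDITION & SPEC =====
def Spec_wordOfInterest (pos : List (List (String × String))) (out : List (List (String × String))) : Prop := out = wordOfInterest_alt pos
instance (pos : List (List (String × String))) (out : List (List (String × String))) : Decidable (Spec_wordOfInterest pos out) := by unfold Spec_wordOfInterest; infer_instance

-- ===== CLAIM (what is proved, stated in full; the proofs are below) =====
def Claim_equal_wordOfInterest : Prop := ∀ (pos : List (List (String × String))), Dom_wordOfInterest pos → Spec_wordOfInterest pos (wordOfInterest pos)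

-- ===== LEMMAS AND PROOFS =====

-- A's phase-2 inner loop body as an Option-valued classifier
def pvClassify (j : String × String) : Option (String × String) :=
  if j.2 = "VBD" ∨ j.2 = "VB" ∨ j.2 = "VBP" then some (j.1, "v")
  else if j.2 = "VBG" then some (j.1, "n")
  else if j.2 = "NN" ∨ j.2 = "NNP" then some (j.1, "n")
  else if j.2 = "JJ" ∨ j.2 = "JJR" ∨ j.2 = "JJS" then some (j.1, "a")
  else if j.2 = "RB" then some (j.1, "r")
  else none

-- B's inner loop body as an Option-valued classifier
def pvBStep (y : String × String) : Option (String × String) :=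
  if PySem.Set.contains pvValid y.2 then
    some (y.1,
      if y.2 = "VBG" then "n"
      else (PySem.Dict.get? pvFirst
              (String.mk (((PySem.Str.pyGet? y.2 0).map (fun c => [c])).getD []))).getD "")
  else none

theorem foldl_classify (i : List (String × String)) (acc : List (String × String)) :
    i.foldl (fun arr2 j =>
      if j.2 = "VBD" ∨ j.2 = "VB" ∨ j.2 = "VBP" then arr2 ++ [(j.1, "v")]
      else if j.2 = "VBG" then arr2 ++ [(j.1, "n")]
      else if j.2 = "NN" ∨ j.2 = "NNP" then arr2 ++ [(j.1, "n")]
      else if j.2 = "JJ" ∨ j.2 = "JJR" ∨ j.2 = "JJS" then arr2 ++ [(j.1, "a")]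
      else if j.2 = "RB" then arr2 ++ [(j.1, "r")]
      else arr2) acc = acc ++ i.filterMap pvClassify := by
  induction i generalizing acc with
  | nil => simp
  | cons j t ih =>
    rw [List.foldl_cons, List.filterMap_cons, ih]
    generalize t.filterMap pvClassify = r
    simp only [pvClassify]
    split_ifs <;> simp

theorem foldl_bstep (x : List (String × String)) (acc : List (String × String)) :
    x.foldl (fun row y =>
      if PySem.Set.contains pvValid y.2 then
        row ++ [(y.1,
          if y.2 = "VBG" then "n"
          else (PySem.Dict.get? pvFirst
                  (String.mk (((PySem.Str.pyGet? y.2 0).map (fun c => [c])).getD []))).getD "")]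
      else row) acc = acc ++ x.filterMap pvBStep := by
  induction x generalizing acc with
  | nil => simp
  | cons y t ih =>
    rw [List.foldl_cons, List.filterMap_cons, ih]
    generalize t.filterMap pvBStep = r
    simp only [pvBStep]
    split_ifs <;> simp

-- pointwise: A's filter-then-classify decision equals B's fused first-letter decision
theorem pv_filterMap_filter {α β : Type} (p : α → Bool) (f : α → Option β) (l : List α) :
    (l.filter p).filterMap f = l.filterMap (fun a => if p a then f a else none) := by
  induction l with
  | nil => rfl
  | cons a t ih => by_cases h : p a <;> simp [List.filter_cons, h, List.filterMap_cons, ih]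

theorem classify_eq (y : String × String) :
    (if pvWnPos.contains y.2 then pvClassify y else none) = pvBStep y := by
  obtain ⟨w, t⟩ := y
  have eN : String.mk ['N'] = "N" := rfl
  have eV : String.mk ['V'] = "V" := rfl
  have eJ : String.mk ['J'] = "J" := rfl
  have eR : String.mk ['R'] = "R" := rfl
  by_cases h1 : t = "NN" <;> by_cases h2 : t = "VB" <;> by_cases h3 : t = "JJ" <;>
    by_cases h4 : t = "JJR" <;> by_cases h5 : t = "JJS" <;> by_cases h6 : t = "NNP" <;>
    by_cases h7 : t = "VBG" <;> by_cases h8 : t = "RB" <;> by_cases h9 : t = "VBD" <;>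
    by_cases h10 : t = "VBP" <;>
  simp_all [pvWnPos, pvValid, pvFirst, pvClassify, pvBStep, PySem.Set.contains,
    PySem.Set.ofList, PySem.Set.add, PySem.Dict.get?, PySem.Dict.ofList,
    PySem.Dict.update, PySem.Dict.insert, PySem.Dict.empty, List.find?,
    PySem.Str.pyGet?, eN, eV, eJ, eR]

-- per-sentence: A's two staged inner loops equal B's single fused filterMap
theorem inner_eq (x : List (String × String)) :
    (x.foldl (fun arr y => if pvWnPos.contains y.2 then arr ++ [y] else arr)
        []).filterMap pvClassify
      = x.filterMap pvBStep := by
  rw [PySem.List.foldl_append_if_eq_filter]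
  simp only [List.nil_append]
  rw [pv_filterMap_filter]
  simp only [classify_eq]

-- ===== VERDICT (by name: the statement is the Claim_ definition above) =====
theorem wordOfInterest_spec : Claim_equal_wordOfInterest := by
  intro pos _
  show wordOfInterest pos = wordOfInterest_alt pos
  unfold wordOfInterest wordOfInterest_alt
  simp only [PySem.List.foldl_append_singleton_eq_map, foldl_classify, foldl_bstep,
    List.nil_append, List.map_map]
  exact List.map_congr_left fun x _ => inner_eq x
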